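-- pv_equiv track=rewrite | github.com/heimgewebe/tools | merger/wc-merger/core.py | _pick_primary_artifact
-- ===== SOURCE A (Python) =====
-- def _pick_primary_artifact(paths):
--     for p in paths:
--         try:
--             if str(p).lower().endswith(".json"):
--                 return p
--         except Exception:
--             pass
--     for p in paths:
--         try:
--             if str(p).lower().endswith(".md"):
--                 return p
--         except Exception:
--             pass
--     return paths[0] if paths else None
-- ===== SOURCE B (Python) =====
-- def _pick_primary_artifact(paths):
--     first_md = None
--     for p in paths:
--         try:
--             p_l = str(p).lower()
--             if p_l.endswith(".json"):
--                 return p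
--             if p_l.endswith(".md") and first_md is None:
--                 first_md = p
--         except Exception:
--             pass
--     if first_md is not None:
--         return first_md
--     return paths[0] if paths else None
-- ===== Notes on version B (the rewrite author's own statement) =====
-- stated objective: simpler
-- what changed: Replaced A's two separate scans (.json scan, then .md scan) by one pass that returns the first .json immediately while recording the first .md as a fallback candidate.
import Mathlib
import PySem

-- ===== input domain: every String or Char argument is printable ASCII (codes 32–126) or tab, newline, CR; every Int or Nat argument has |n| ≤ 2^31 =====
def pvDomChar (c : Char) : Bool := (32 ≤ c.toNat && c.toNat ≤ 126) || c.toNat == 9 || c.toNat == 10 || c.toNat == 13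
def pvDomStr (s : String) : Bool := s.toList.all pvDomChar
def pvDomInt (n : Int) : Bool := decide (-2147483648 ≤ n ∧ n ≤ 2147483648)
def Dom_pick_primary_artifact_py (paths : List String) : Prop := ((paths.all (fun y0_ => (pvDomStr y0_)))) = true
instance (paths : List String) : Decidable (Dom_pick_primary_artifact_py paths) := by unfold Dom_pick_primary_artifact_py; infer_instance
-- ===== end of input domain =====

-- ===== PORT A =====
-- B does one pass, tracking the first .md as fallback, instead of A's two scans.
-- str(p) never raises for strings, so the try/except in both Pythons is dead code on this domain.
def pvEndsJson (p : String) : Bool := PySem.Str.endswith (PySem.Str.lower p) ".json"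
def pvEndsMd (p : String) : Bool := PySem.Str.endswith (PySem.Str.lower p) ".md"
-- first loop of A
def pvFindJson : List String → Option String
  | [] => none
  | p :: ps => if pvEndsJson p then some p else pvFindJson ps
-- second loop of A
def pvFindMd : List String → Option String
  | [] => none
  | p :: ps => if pvEndsMd p then some p else pvFindMd ps
def pick_primary_artifact_py (paths : List String) : Option String :=
  match pvFindJson paths with
  | some p => some p
  | none =>
    match pvFindMd paths with
    | some p => some p
    | none => match paths with | [] => none | p :: _ => some p

-- ===== PORT B =====
-- single pass: fm is first_md, fb is the final fallback (paths[0] if paths else None)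
def pvGo : List String → Option String → Option String → Option String
  | [], fm, fb => match fm with | some m => some m | none => fb
  | p :: ps, fm, fb =>
    if pvEndsJson p then some p
    else if pvEndsMd p && fm.isNone then pvGo ps (some p) fb
    else pvGo ps fm fb
def pick_primary_artifact_py_alt (paths : List String) : Option String :=
  pvGo paths none (match paths with | [] => none | p :: _ => some p)

-- ===== PRECONDITION & SPEC =====
def Spec_pick_primary_artifact_py (paths : List String) (out : Option String) : Prop := out = pick_primary_artifact_py_alt paths
instance (paths : List String) (out : Option String) : Decidable (Spec_pick_primary_artifact_py paths out) := by unfold Spec_pick_primary_artifact_py; infer_instance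

-- ===== CLAIM (what is proved, stated in full; the proofs are below) =====
def Claim_equal_pick_primary_artifact_py : Prop := ∀ (paths : List String), Dom_pick_primary_artifact_py paths → Spec_pick_primary_artifact_py paths (pick_primary_artifact_py paths)

-- ===== LEMMAS AND PROOFS =====

-- ===== VERDICT (by name: the statement is the Claim_ definition above) =====
lemma pvGo_eq (ps : List String) (fm fb : Option String) :
    pvGo ps fm fb =
      match pvFindJson ps with
      | some j => some j
      | none =>
        match fm with
        | some m => some m
        | none => match pvFindMd ps with | some m => some m | none => fb := by
  induction ps generalizing fm with
  | nil => cases fm <;> simp [pvGo, pvFindJson, pvFindMd]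
  | cons p ps ih =>
    simp only [pvGo, pvFindJson, pvFindMd]
    by_cases hj : pvEndsJson p
    · simp [hj]
    · by_cases hm : pvEndsMd p
      · cases fm <;> simp [hj, hm, ih]
      · cases fm <;> simp [hj, hm, ih]

theorem pick_primary_artifact_py_spec : Claim_equal_pick_primary_artifact_py := by
  intro paths _
  unfold Spec_pick_primary_artifact_py pick_primary_artifact_py pick_primary_artifact_py_alt
  rw [pvGo_eq]
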